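-- pv_equiv track=rewrite | github.com/cekura-ai/docs | scripts/sync_descriptions.py | add_description_to_frontmatter
-- ===== SOURCE A (Python) =====
-- def escape_yaml_string(s: str) -> str:
--     """Escape a string for safe YAML double-quoted value."""
--     return s.replace("\\", "\\\\").replace('"', '\\"')
--
-- def add_description_to_frontmatter(fm_text: str, description: str) -> str:
--     """Add or update description field in YAML frontmatter."""
--     lines = fm_text.split("\n")
--     new_lines = []
--     description_added = False
--     escaped = escape_yaml_string(description)
--
--     for line in lines:
--         stripped = line.strip()
--         if stripped.startswith("description:"):
--             # Replace existing description
--             new_lines.append(f'description: "{escaped}"')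
--             description_added = True
--         else:
--             new_lines.append(line)
--
--     if not description_added:
--         # Add description after title line
--         final_lines = []
--         for line in new_lines:
--             final_lines.append(line)
--             if line.strip().startswith("title:"):
--                 final_lines.append(f'description: "{escaped}"')
--                 description_added = True
--
--         if not description_added:
--             # Fallback: add at the end
--             final_lines.append(f'description: "{escaped}"')
--
--         new_lines = final_lines
--
--     return "\n".join(new_lines)
-- ===== SOURCE B (Python) =====
-- def add_description_to_frontmatter(fm_text: str, description: str) -> str:
--     """Add or update description field in YAML frontmatter."""
--     escaped = description.replace("\\", "\\\\").replace('"', '\\"')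
--     desc_line = f'description: "{escaped}"'
--     repl, ins = [], []          # candidate outputs, built in ONE pass
--     has_desc = has_title = False
--     for line in fm_text.split("\n"):
--         s = line.strip()
--         if s.startswith("description:"):
--             repl.append(desc_line)
--             has_desc = True
--         else:
--             repl.append(line)
--         ins.append(line)
--         if s.startswith("title:"):
--             ins.append(desc_line)
--             has_title = True
--     if has_desc:
--         out = repl
--     elif has_title:
--         out = ins
--     else:
--         out = ins + [desc_line]
--     return "\n".join(out)
-- ===== Notes on version B (the rewrite author's own statement) =====
-- stated objective: alternative
-- what changed: B makes a single fused pass over the lines that simultaneously builds both candidate outputs (the replace-every-description list and the insert-after-title list) and the two flags, then selects one at the end, instead of A's staged loops (replacement loop, then a conditional second insertion loop over its output).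
import Mathlib
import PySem

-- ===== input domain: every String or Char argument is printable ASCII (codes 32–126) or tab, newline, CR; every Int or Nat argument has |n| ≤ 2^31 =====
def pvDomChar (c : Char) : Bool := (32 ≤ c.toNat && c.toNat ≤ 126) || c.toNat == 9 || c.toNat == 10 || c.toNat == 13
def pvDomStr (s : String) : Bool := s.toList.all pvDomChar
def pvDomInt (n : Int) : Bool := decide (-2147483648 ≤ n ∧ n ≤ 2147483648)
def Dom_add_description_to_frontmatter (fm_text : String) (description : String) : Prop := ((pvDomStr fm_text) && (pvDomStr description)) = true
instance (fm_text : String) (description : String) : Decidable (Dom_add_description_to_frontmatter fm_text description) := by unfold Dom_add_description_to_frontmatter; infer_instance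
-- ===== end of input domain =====

-- B replaces A's staged loops (replace loop, then a conditional insertion loop over its output)
-- by ONE fused pass that builds both candidate outputs and both flags simultaneously and
-- selects at the end (objective: alternative).

-- shared helpers (both Pythons compute line.strip().startswith(...), the same escape, and split("\n"))
-- exact: sep "\n" is nonempty, so split? is always `some`
def pvSplitNL (s : String) : List String := (PySem.Str.split? s "\n").getD []
def pvDescP (l : String) : Bool := PySem.Str.startswith (PySem.Str.strip l) "description:"
def pvTitleP (l : String) : Bool := PySem.Str.startswith (PySem.Str.strip l) "title:"
def pvEscape (s : String) : String :=
  PySem.Str.replace (PySem.Str.replace s "\\" "\\\\") "\"" "\\\""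

-- ===== PORT A =====
def add_description_to_frontmatter (fm_text : String) (description : String) : String :=
  let lines := pvSplitNL fm_text
  let escaped := pvEscape description
  -- first loop: new_lines / description_added
  let st := lines.foldl (fun (st : List String × Bool) line =>
      if pvDescP line then (st.1 ++ ["description: \"" ++ escaped ++ "\""], true)
      else (st.1 ++ [line], st.2)) ([], false)
  if st.2 = false then
    -- second loop: insert after title lines
    let st2 := st.1.foldl (fun (st2 : List String × Bool) line =>
        if pvTitleP line then (st2.1 ++ [line, "description: \"" ++ escaped ++ "\""], true)
        else (st2.1 ++ [line], st2.2)) ([], false)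
    let final_lines := if st2.2 = false then st2.1 ++ ["description: \"" ++ escaped ++ "\""] else st2.1
    PySem.Str.join "\n" final_lines
  else
    PySem.Str.join "\n" st.1

-- ===== PORT B =====
-- state = (repl, ins, has_desc, has_title), exactly Source B's single fused loop
def add_description_to_frontmatter_alt (fm_text : String) (description : String) : String :=
  let descLine := "description: \"" ++ pvEscape description ++ "\""
  let st := (pvSplitNL fm_text).foldl
    (fun (st : List String × List String × Bool × Bool) line =>
      let repl := if pvDescP line then st.1 ++ [descLine] else st.1 ++ [line]
      let hd := if pvDescP line then true else st.2.2.1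
      let ins := if pvTitleP line then st.2.1 ++ [line, descLine] else st.2.1 ++ [line]
      let ht := if pvTitleP line then true else st.2.2.2
      (repl, ins, hd, ht))
    ([], [], false, false)
  let out := if st.2.2.1 then st.1 else if st.2.2.2 then st.2.1 else st.2.1 ++ [descLine]
  PySem.Str.join "\n" out

-- ===== PRECONDITION & SPEC =====
def Spec_add_description_to_frontmatter (fm_text : String) (description : String) (out : String) : Prop := out = add_description_to_frontmatter_alt fm_text description
instance (fm_text : String) (description : String) (out : String) : Decidable (Spec_add_description_to_frontmatter fm_text description out) := by unfold Spec_add_description_to_frontmatter; infer_instance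

-- ===== CLAIM (what is proved, stated in full; the proofs are below) =====
def Claim_equal_add_description_to_frontmatter : Prop := ∀ (fm_text : String) (description : String), Dom_add_description_to_frontmatter fm_text description → Spec_add_description_to_frontmatter fm_text description (add_description_to_frontmatter fm_text description)

-- ===== LEMMAS AND PROOFS =====

-- A's first loop = map + any
theorem pvFold1 (d : String) (lines : List String) (acc : List String) (b : Bool) :
    lines.foldl (fun (st : List String × Bool) line =>
      if pvDescP line then (st.1 ++ [d], true)
      else (st.1 ++ [line], st.2)) (acc, b)
    = (acc ++ lines.map (fun l => if pvDescP l then d else l), b || lines.any pvDescP) := by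
  induction lines generalizing acc b with
  | nil => simp
  | cons l t ih =>
    by_cases h : pvDescP l = true <;> simp [h, ih]

-- A's second loop = flatMap + any
theorem pvFold2 (d : String) (lines : List String) (acc : List String) (b : Bool) :
    lines.foldl (fun (st2 : List String × Bool) line =>
      if pvTitleP line then (st2.1 ++ [line, d], true)
      else (st2.1 ++ [line], st2.2)) (acc, b)
    = (acc ++ lines.flatMap (fun l => if pvTitleP l then [l, d] else [l]), b || lines.any pvTitleP) := by
  induction lines generalizing acc b with
  | nil => simp
  | cons l t ih =>
    by_cases h : pvTitleP l = true <;> simp [h, ih]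

-- B's fused loop = the four canonical pieces at once
theorem pvFoldB (d : String) (lines : List String) (r i : List String) (hd ht : Bool) :
    lines.foldl (fun (st : List String × List String × Bool × Bool) line =>
      let repl := if pvDescP line then st.1 ++ [d] else st.1 ++ [line]
      let hd := if pvDescP line then true else st.2.2.1
      let ins := if pvTitleP line then st.2.1 ++ [line, d] else st.2.1 ++ [line]
      let ht := if pvTitleP line then true else st.2.2.2
      (repl, ins, hd, ht)) (r, i, hd, ht)
    = (r ++ lines.map (fun l => if pvDescP l then d else l),
       i ++ lines.flatMap (fun l => if pvTitleP l then [l, d] else [l]),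
       hd || lines.any pvDescP, ht || lines.any pvTitleP) := by
  induction lines generalizing r i hd ht with
  | nil => simp
  | cons l t ih =>
    simp only [List.foldl_cons]
    by_cases h1 : pvDescP l = true <;> by_cases h2 : pvTitleP l = true <;>
      simp only [h1, h2, if_true, if_false, Bool.false_eq_true, ih, List.append_assoc,
        List.map_cons, List.flatMap_cons, List.any_cons, List.cons_append, List.nil_append, Bool.true_or, Bool.false_or] <;> simp

theorem pvMapId (d : String) (lines : List String) (h : lines.any pvDescP = false) :
    lines.map (fun l => if pvDescP l then d else l) = lines := by
  rw [List.map_congr_left (g := id), List.map_id]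
  intro l hl
  simp only [List.any_eq_false] at h
  simp [h l hl]

theorem pvFlatId (d : String) (lines : List String) (h : lines.any pvTitleP = false) :
    lines.flatMap (fun l => if pvTitleP l then [l, d] else [l]) = lines := by
  simp only [List.any_eq_false] at h
  induction lines with
  | nil => simp
  | cons l t ih =>
    simp [h l (by simp), ih (fun x hx => h x (by simp [hx]))]

-- ===== VERDICT (by name: the statement is the Claim_ definition above) =====
theorem add_description_to_frontmatter_spec : Claim_equal_add_description_to_frontmatter := by
  intro fm_text description _
  unfold Spec_add_description_to_frontmatter
  unfold add_description_to_frontmatter add_description_to_frontmatter_alt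
  simp only [pvFold1, pvFoldB, List.nil_append, Bool.false_or]
  set d := "description: \"" ++ pvEscape description ++ "\"" with hd
  set lines := pvSplitNL fm_text with hlines
  by_cases hAny : lines.any pvDescP = true
  · simp [hAny]
  · simp only [Bool.not_eq_true] at hAny
    simp only [hAny, pvMapId d lines hAny, pvFold2, List.nil_append, Bool.false_or,
      Bool.false_eq_true, if_false]
    by_cases hT : lines.any pvTitleP = true
    · simp [hT]
    · simp only [Bool.not_eq_true] at hT
      simp [hT, pvFlatId d lines hT]
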